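-- pv_equiv track=rewrite | github.com/intentodemusico/Cripto | Taller3-Criptoanalisis/Cryptoanalysis_Codes/01-SubstitutionMono_CryptoFreq.py | get_dict_freq_as_list
-- ===== SOURCE A (Python) =====
-- from operator import itemgetter
--
-- def get_dict_freq_as_list(encrypt_text):
--     encrypt_freq_dict = {}
--     for char in encrypt_text:
--         if char in encrypt_freq_dict:
--             encrypt_freq_dict[char] = encrypt_freq_dict[char] + 1;
--         else:
--             encrypt_freq_dict[char] = 1;
--     return sorted(encrypt_freq_dict.items(), key=itemgetter(1), reverse=True)
-- ===== SOURCE B (Python) =====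
-- def get_dict_freq_as_list(encrypt_text):
--     counts = {}
--     for char in encrypt_text:
--         counts[char] = counts.get(char, 0) + 1
--     if not counts:
--         return []
--     maxf = max(counts.values())
--     buckets = [[] for _ in range(maxf + 1)]
--     for item in counts.items():
--         buckets[item[1]].append(item)
--     out = []
--     for f in range(maxf, 0, -1):
--         out.extend(buckets[f])
--     return out
-- ===== Notes on version B (the rewrite author's own statement) =====
-- stated objective: alternative
-- what changed: A sorts the (char,count) items with Python's comparison sort (sorted key=count, reverse=True); B replaces the sort with a counting/bucket sort: it drops each item into buckets[count] in dict insertion order and concatenates buckets from the maximal count down to 1.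
import Mathlib
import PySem

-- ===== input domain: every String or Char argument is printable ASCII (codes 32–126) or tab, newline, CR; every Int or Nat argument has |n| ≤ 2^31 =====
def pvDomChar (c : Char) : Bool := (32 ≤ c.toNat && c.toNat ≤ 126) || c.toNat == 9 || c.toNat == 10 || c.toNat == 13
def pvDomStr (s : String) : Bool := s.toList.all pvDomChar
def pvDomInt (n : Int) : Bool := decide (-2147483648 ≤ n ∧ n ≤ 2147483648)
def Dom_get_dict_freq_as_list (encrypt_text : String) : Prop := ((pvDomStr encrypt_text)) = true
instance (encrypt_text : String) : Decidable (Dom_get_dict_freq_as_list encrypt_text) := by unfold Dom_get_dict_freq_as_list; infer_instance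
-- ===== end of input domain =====

-- B replaces A's comparison sort (sorted by count, reverse=True) by a counting/bucket sort
-- over the frequency values; objective: alternative algorithm, same exact output.


-- ===== PORT A =====
-- Python iterates the string char by char; each char is a one-character str → String key.
def get_dict_freq_as_list (encrypt_text : String) : List (String × Int) :=
  PySem.List.sorted
    ((encrypt_text.toList.map (fun c => String.singleton c)).foldl
      (fun d ch => if d.contains ch then d.insert ch ((d.get? ch).getD 0 + 1) else d.insert ch 1)
      PySem.Dict.empty).items
    (fun p => p.2) true

-- ===== PORT B =====
-- buckets[item[1]].append(item): counts are always in [1, maxf] (proved below), so the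
-- in-range List.set/getD-based update is exact on every reachable index.
def pvBucketAdd (bs : List (List (String × Int))) (n : Nat) (p : String × Int) :
    List (List (String × Int)) :=
  bs.set n (bs.getD n [] ++ [p])

def get_dict_freq_as_list_alt (encrypt_text : String) : List (String × Int) :=
  match ((encrypt_text.toList.map (fun c => String.singleton c)).foldl
      (fun d ch => d.insert ch (d.getD ch 0 + 1)) PySem.Dict.empty).items with
  | [] => []
  | it :: its =>
    (PySem.List.pyRange ((its.map (·.2)).foldl max it.2) 0 (-1)).foldl
      (fun out f => out ++ PySem.List.pyGetD
        ((it :: its).foldl (fun bs p => pvBucketAdd bs p.2.toNat p)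
          (List.replicate ((its.map (·.2)).foldl max it.2 + 1).toNat [])) f []) []

-- ===== PRECONDITION & SPEC =====
def Spec_get_dict_freq_as_list (encrypt_text : String) (out : List (String × Int)) : Prop := out = get_dict_freq_as_list_alt encrypt_text
instance (encrypt_text : String) (out : List (String × Int)) : Decidable (Spec_get_dict_freq_as_list encrypt_text out) := by unfold Spec_get_dict_freq_as_list; infer_instance

-- ===== CLAIM (what is proved, stated in full; the proofs are below) =====
def Claim_equal_get_dict_freq_as_list : Prop := ∀ (encrypt_text : String), Dom_get_dict_freq_as_list encrypt_text → Spec_get_dict_freq_as_list encrypt_text (get_dict_freq_as_list encrypt_text)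

-- ===== LEMMAS AND PROOFS =====

-- inserting before nothing in a prefix it does not precede
lemma insertBy_append_left {α : Type} (before : α → α → Bool) (x : α) (l m : List α)
    (h : ∀ y ∈ l, before x y = false) :
    PySem.List.insertBy before x (l ++ m) = l ++ PySem.List.insertBy before x m := by
  induction l with
  | nil => simp
  | cons a l ih =>
    simp only [List.cons_append, PySem.List.insertBy, h a (by simp)]
    simp [ih (fun y hy => h y (by simp [hy]))]

lemma insertBy_eq_cons {α : Type} (before : α → α → Bool) (x : α) (m : List α)
    (h : ∀ y ∈ m, before x y = true) :
    PySem.List.insertBy before x m = x :: m := by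
  cases m with
  | nil => simp [PySem.List.insertBy]
  | cons a l => simp [PySem.List.insertBy, h a (by simp)]

-- stable reverse-insertion of x into a descending bucket decomposition
lemma insertBy_flatMap {α : Type} (key : α → Int) (x : α) (cs : List Int) (b : Int → List α)
    (hdesc : cs.Pairwise (fun a c => c < a))
    (hb : ∀ c ∈ cs, ∀ y ∈ b c, key y = c)
    (hx : key x ∈ cs) :
    PySem.List.insertBy (fun a c => decide (key c < key a)) x (cs.flatMap b)
      = cs.flatMap (fun c => b c ++ if key x = c then [x] else []) := by
  induction cs with
  | nil => cases hx
  | cons c cs ih =>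
    have hhead : ∀ z ∈ cs, z < c := (List.pairwise_cons.mp hdesc).1
    have htail := (List.pairwise_cons.mp hdesc).2
    have hrest : ∀ y ∈ cs.flatMap b, key y < c := by
      intro y hy
      rcases List.mem_flatMap.mp hy with ⟨c', hc', hyc'⟩
      rw [hb c' (by simp [hc']) y hyc']
      exact hhead c' hc'
    simp only [List.flatMap_cons]
    by_cases hxc : key x = c
    · rw [insertBy_append_left _ _ _ _ (by
        intro y hy
        rw [hb c (by simp) y hy, hxc]
        simp)]
      rw [insertBy_eq_cons _ _ _ (by
        intro y hy
        simp [hxc, hrest y hy])]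
      rw [if_pos hxc]
      have hcongr : List.flatMap (fun c => b c ++ if key x = c then [x] else []) cs
          = List.flatMap b cs := List.flatMap_congr (by
        intro c' hc'
        have : key x ≠ c' := by rw [hxc]; exact fun h => absurd (hhead c' hc') (by omega)
        simp [this])
      rw [hcongr]
      simp
    · have hx' : key x ∈ cs := by
        rcases List.mem_cons.mp hx with h | h
        · exact absurd h hxc
        · exact h
      rw [insertBy_append_left _ _ _ _ (by
        intro y hy
        rw [hb c (by simp) y hy]
        have : key x < c := hhead _ hx'
        simp; omega)]
      rw [ih htail (fun c' hc' => hb c' (by simp [hc'])) hx', if_neg hxc]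
      simp

-- Python's stable sorted(key, reverse=True) equals the descending bucket concatenation.
lemma sorted_rev_eq_flatMap_filter {α : Type} (key : α → Int) (xs : List α) (cs : List Int)
    (hdesc : cs.Pairwise (fun a c => c < a))
    (hmem : ∀ x ∈ xs, key x ∈ cs) :
    PySem.List.sorted xs key true
      = cs.flatMap (fun c => xs.filter (fun x => decide (key x = c))) := by
  induction xs using List.reverseRecOn with
  | nil => simp [PySem.List.sorted]
  | append_singleton l x ih =>
    rw [PySem.List.sorted_rev_eq_foldl_insertBy, List.foldl_append, List.foldl_cons,
      List.foldl_nil, ← PySem.List.sorted_rev_eq_foldl_insertBy,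
      ih (fun y hy => hmem y (by simp [hy]))]
    rw [insertBy_flatMap key x cs (fun c => l.filter (fun y => decide (key y = c))) hdesc
      (by intro c _ y hy; simpa using (List.mem_filter.mp hy).2)
      (hmem x (by simp))]
    apply List.flatMap_congr
    intro c _
    rw [List.filter_append]
    simp only [List.filter_cons, List.filter_nil]
    by_cases h : key x = c <;> simp [h]

-- the bucket-filling loop of B: bucket j collects, in order, the items with count j
lemma fill_spec (l : List (String × Int)) :
    ∀ (B : List (List (String × Int))), (∀ p ∈ l, 0 ≤ p.2 ∧ p.2.toNat < B.length) →
    ∀ j, j < B.length →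
      (l.foldl (fun bs p => pvBucketAdd bs p.2.toNat p) B).getD j []
        = B.getD j [] ++ l.filter (fun p => decide (p.2 = (j : Int))) := by
  induction l with
  | nil => intro B _ j _; simp
  | cons p l ih =>
    intro B hB j hj
    simp only [List.foldl_cons, List.filter_cons]
    have hp := hB p (by simp)
    have hlen : (pvBucketAdd B p.2.toNat p).length = B.length := by
      simp [pvBucketAdd]
    rw [ih (pvBucketAdd B p.2.toNat p)
      (by intro q hq; rw [hlen]; exact hB q (by simp [hq])) j (by omega)]
    by_cases hjp : p.2 = (j : Int)
    · have hn : p.2.toNat = j := by omega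
      rw [if_pos (by simpa using hjp)]
      have : (pvBucketAdd B p.2.toNat p).getD j [] = B.getD j [] ++ [p] := by
        rw [pvBucketAdd, hn, List.getD_eq_getElem?_getD, List.getElem?_set_self]
        · rfl
        · exact hj
      rw [this]
      simp
    · have hn : p.2.toNat ≠ j := by omega
      rw [if_neg (by simpa using hjp)]
      have : (pvBucketAdd B p.2.toNat p).getD j [] = B.getD j [] := by
        rw [pvBucketAdd, List.getD_eq_getElem?_getD, List.getD_eq_getElem?_getD,
          List.getElem?_set_ne (by omega)]
        rw [List.getD_eq_getElem?_getD]
      rw [this]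

-- A's guarded counting step is the get-with-default counting step
lemma stepA_eq_stepB (d : PySem.Dict String Int) (ch : String) :
    (if d.contains ch then d.insert ch ((d.get? ch).getD 0 + 1) else d.insert ch 1)
      = d.insert ch (d.getD ch 0 + 1) := by
  by_cases h : d.contains ch
  · simp [h, PySem.Dict.getD_eq_get?_getD]
  · simp only [Bool.not_eq_true] at h
    simp [h, PySem.Dict.getD_of_not_contains _ _ h]

-- the pyRange maxf..1 is strictly descending
lemma pyRange_neg_one_desc (a b : Int) :
    (PySem.List.pyRange a b (-1)).Pairwise (fun x y => y < x) := by
  rw [PySem.List.pyRange_neg_one]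
  exact (List.pairwise_map).mpr ((List.pairwise_lt_range).imp (by intro i j h; omega))

-- ===== VERDICT (by name: the statement is the Claim_ definition above) =====
theorem get_dict_freq_as_list_spec : Claim_equal_get_dict_freq_as_list := by
  intro e _
  unfold Spec_get_dict_freq_as_list get_dict_freq_as_list get_dict_freq_as_list_alt
  set L := e.toList.map (fun c => String.singleton c) with hL
  have hdict : L.foldl
      (fun d ch => if d.contains ch then d.insert ch ((d.get? ch).getD 0 + 1) else d.insert ch 1)
      PySem.Dict.empty = PySem.Dict.counter L := by
    rw [PySem.List.foldl_congr_mem _ _ (fun d ch => d.insert ch (d.getD ch 0 + 1)) _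
      (fun d ch _ => stepA_eq_stepB d ch)]
    exact PySem.Dict.foldl_insert_getD_add_one_eq_counter L
  have hdictB : L.foldl (fun d ch => d.insert ch (d.getD ch 0 + 1)) PySem.Dict.empty
      = PySem.Dict.counter L := PySem.Dict.foldl_insert_getD_add_one_eq_counter L
  rw [hdict, hdictB]
  have hitems : (PySem.Dict.counter L).items
      = (PySem.Set.ofList L).map (fun k => (k, (L.count k : Int))) :=
    PySem.Dict.items_counter L
  -- every stored count is positive
  have hpos : ∀ p ∈ (PySem.Dict.counter L).items, 1 ≤ p.2 := by
    intro p hp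
    rw [hitems] at hp
    rcases List.mem_map.mp hp with ⟨k, hk, rfl⟩
    have : k ∈ L := (PySem.Set.mem_ofList L k).mp hk
    have := List.count_pos_iff.mpr this
    simp; omega
  cases hI : (PySem.Dict.counter L).items with
  | nil => rfl
  | cons it its =>
    simp only
    set M : Int := (its.map (·.2)).foldl max it.2 with hM
    have hmax := PySem.List.le_foldl_max (its.map (·.2)) it.2
    have hle : ∀ p ∈ it :: its, p.2 ≤ M := by
      intro p hp
      rcases hp with _ | hp
      · exact hmax.1
      · exact hmax.2 _ (List.mem_map.mpr ⟨p, by assumption, rfl⟩)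
    have hpos' : ∀ p ∈ it :: its, 1 ≤ p.2 := by
      intro p hp; exact hpos p (by rw [hI]; exact hp)
    have hM1 : 1 ≤ M := le_trans (hpos' it (by simp)) hmax.1
    have hblen : (List.replicate (M + 1).toNat ([] : List (String × Int))).length
        = (M + 1).toNat := by simp
    have hfill := fill_spec (it :: its) (List.replicate (M + 1).toNat [])
      (by
        intro p hp
        have h1 := hpos' p hp
        have h2 := hle p hp
        constructor
        · omega
        · rw [hblen]; omega)
    -- B's output fold is a flatMap over the countdown range
    rw [PySem.List.foldl_append_eq_flatMap]
    -- A's sort is the same flatMap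
    rw [sorted_rev_eq_flatMap_filter (fun p => p.2) (it :: its)
      (PySem.List.pyRange M 0 (-1)) (pyRange_neg_one_desc M 0)
      (by
        intro p hp
        rw [PySem.List.mem_pyRange_neg_one]
        exact ⟨by have := hpos' p hp; beta_reduce; omega, hle p hp⟩)]
    simp only [List.nil_append]
    apply List.flatMap_congr
    intro c hc
    have hcb : 0 < c ∧ c ≤ M := (PySem.List.mem_pyRange_neg_one).mp hc
    rw [PySem.List.pyGetD_of_nonneg _ _ (by omega)]
    rw [hfill c.toNat (by rw [hblen]; omega)]
    have : ((c.toNat : Int)) = c := by omega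
    simp [this]
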